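-- pv_equiv track=rewrite | github.com/ntang/gvoice-sms-takeout-xml | core/summary_generator.py | _calculate_date_range
-- ===== SOURCE A (Python) =====
-- from typing import List, Dict, Optional
--
-- def _calculate_date_range(messages: List[Dict]) -> str:
--     """
--     Calculate date range from message timestamps.
--
--     Args:
--         messages: List of message dicts with 'timestamp' key
--
--     Returns:
--         Date range string like "2024-01-15 to 2024-01-20"
--         Returns "Unknown" if no valid dates found
--     """
--     if not messages:
--         return "Unknown"
--
--     dates = []
--     for msg in messages:
--         timestamp_str = msg.get('timestamp', '')
--         if timestamp_str:
--             try: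
--                 # Parse format: "2024-11-25 16:09:04"
--                 # Extract just the date part
--                 date_part = timestamp_str.split()[0]  # Get "2024-11-25"
--                 dates.append(date_part)
--             except:
--                 continue
--
--     if dates:
--         return f"{min(dates)} to {max(dates)}"
--     return "Unknown"
-- ===== SOURCE B (Python) =====
-- from typing import List, Dict
--
-- def _calculate_date_range(messages: List[Dict]) -> str:
--     """Single pass keeping running (lo, hi) date bounds; no intermediate list."""
--     bounds = None
--     for msg in messages:
--         timestamp_str = msg.get('timestamp', '')
--         if not timestamp_str:
--             continue
--         parts = timestamp_str.split()
--         if not parts: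
--             continue
--         d = parts[0]
--         bounds = (d, d) if bounds is None else (min(bounds[0], d), max(bounds[1], d))
--     return f"{bounds[0]} to {bounds[1]}" if bounds is not None else "Unknown"
-- ===== Notes on version B (the rewrite author's own statement) =====
-- stated objective: simpler
-- what changed: Replaces build-a-dates-list-then-min()-and-max() (three passes, O(n) extra memory) with one pass maintaining running (lo, hi) bounds and no intermediate list; whitespace-only timestamps are skipped explicitly instead of via a caught IndexError.
import Mathlib
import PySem

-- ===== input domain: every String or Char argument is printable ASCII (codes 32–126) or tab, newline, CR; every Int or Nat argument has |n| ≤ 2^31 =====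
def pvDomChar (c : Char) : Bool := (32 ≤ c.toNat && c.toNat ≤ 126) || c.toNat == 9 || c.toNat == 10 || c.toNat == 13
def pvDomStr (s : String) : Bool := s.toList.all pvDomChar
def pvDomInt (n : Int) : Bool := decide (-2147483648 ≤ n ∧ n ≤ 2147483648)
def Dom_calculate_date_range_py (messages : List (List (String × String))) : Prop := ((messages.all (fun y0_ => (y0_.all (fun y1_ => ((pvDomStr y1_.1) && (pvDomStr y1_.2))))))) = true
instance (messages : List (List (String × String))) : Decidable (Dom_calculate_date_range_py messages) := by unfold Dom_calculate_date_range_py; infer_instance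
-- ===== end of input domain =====

-- B replaces A's build-a-list-then-min/max (three passes, O(n) extra space) with a
-- single pass keeping running (lo, hi) bounds; same values on every input.

-- ===== PORT A =====
-- msg.get('timestamp', '') on the association list (first match, default "")
def pvGetTs (msg : List (String × String)) : String :=
  (((msg.find? (fun p => p.1 == "timestamp")).map (fun p => p.2)).getD "")

def calculate_date_range_py (messages : List (List (String × String))) : String :=
  if messages = [] then "Unknown"
  else
    -- dates = []; for msg in messages: … append(date_part)  (split()[0] IndexError → continue)
    let dates := messages.foldl (fun dates msg =>
      let ts := pvGetTs msg
      if ts ≠ "" then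
        match PySem.Str.split₀ ts with
        | [] => dates            -- split()[0] raises IndexError, caught: continue
        | d :: _ => dates ++ [d]
      else dates) []
    if dates ≠ [] then
      match PySem.List.min? dates (fun x => x), PySem.List.max? dates (fun x => x) with
      | some lo, some hi => lo ++ " to " ++ hi
      | _, _ => "Unknown"        -- unreachable: dates ≠ []
    else "Unknown"

-- ===== PORT B =====
-- one loop step: update the optional (lo, hi) bounds from one message
def pvBStep (bounds : Option (String × String)) (msg : List (String × String)) :
    Option (String × String) :=
  let ts := pvGetTs msg
  if ts = "" then bounds
  else
    match PySem.Str.split₀ ts with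
    | [] => bounds
    | d :: _ =>
      match bounds with
      | none => some (d, d)
      | some (lo, hi) => some (min lo d, max hi d)

def calculate_date_range_py_alt (messages : List (List (String × String))) : String :=
  match messages.foldl pvBStep none with
  | some (lo, hi) => lo ++ " to " ++ hi
  | none => "Unknown"

-- ===== PRECONDITION & SPEC =====
def Spec_calculate_date_range_py (messages : List (List (String × String))) (out : String) : Prop := out = calculate_date_range_py_alt messages
instance (messages : List (List (String × String))) (out : String) : Decidable (Spec_calculate_date_range_py messages out) := by unfold Spec_calculate_date_range_py; infer_instance

-- ===== CLAIM (what is proved, stated in full; the proofs are below) =====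
def Claim_equal_calculate_date_range_py : Prop := ∀ (messages : List (List (String × String))), Dom_calculate_date_range_py messages → Spec_calculate_date_range_py messages (calculate_date_range_py messages)

-- ===== LEMMAS AND PROOFS =====

-- the date extracted from one message, if any
def pvDateOf (msg : List (String × String)) : Option String :=
  let ts := pvGetTs msg
  if ts = "" then none
  else
    match PySem.Str.split₀ ts with
    | [] => none
    | d :: _ => some d

lemma pvBStep_eq (bounds : Option (String × String)) (msg : List (String × String)) :
    pvBStep bounds msg =
      match pvDateOf msg with
      | none => bounds
      | some d =>
        match bounds with
        | none => some (d, d)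
        | some (lo, hi) => some (min lo d, max hi d) := by
  unfold pvBStep pvDateOf
  by_cases h : pvGetTs msg = "" <;> simp [h] <;> cases PySem.Str.split₀ (pvGetTs msg) <;> simp

lemma pvAStep_eq (dates : List String) (msg : List (String × String)) :
    (let ts := pvGetTs msg
     if ts ≠ "" then
       match PySem.Str.split₀ ts with
       | [] => dates
       | d :: _ => dates ++ [d]
     else dates) = dates ++ (pvDateOf msg).toList := by
  unfold pvDateOf
  by_cases h : pvGetTs msg = "" <;> simp [h] <;> cases PySem.Str.split₀ (pvGetTs msg) <;> simp

-- A's loop builds exactly the filterMap of pvDateOf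
lemma pvDates_eq (messages : List (List (String × String))) (acc : List String) :
    messages.foldl (fun dates msg =>
      let ts := pvGetTs msg
      if ts ≠ "" then
        match PySem.Str.split₀ ts with
        | [] => dates
        | d :: _ => dates ++ [d]
      else dates) acc = acc ++ messages.filterMap pvDateOf := by
  induction messages generalizing acc with
  | nil => simp
  | cons m t ih =>
    simp only [List.foldl_cons, List.filterMap_cons]
    rw [show (let ts := pvGetTs m
      if ts ≠ "" then
        match PySem.Str.split₀ ts with
        | [] => acc
        | d :: _ => acc ++ [d]
      else acc) = acc ++ (pvDateOf m).toList from pvAStep_eq acc m, ih]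
    cases pvDateOf m <;> simp

-- B's loop is the fold of the min/max step over the same filterMap
lemma pvBFold_eq (messages : List (List (String × String))) (b : Option (String × String)) :
    messages.foldl pvBStep b =
      (messages.filterMap pvDateOf).foldl (fun bounds d =>
        match bounds with
        | none => some (d, d)
        | some (lo, hi) => some (min lo d, max hi d)) b := by
  induction messages generalizing b with
  | nil => simp
  | cons m t ih =>
    simp only [List.foldl_cons, List.filterMap_cons]
    rw [pvBStep_eq]
    cases pvDateOf m <;> simp [ih]

-- the min/max fold over a nonempty list computes (running min, running max)
lemma pvFold_minmax (ds : List String) (lo hi : String) :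
    ds.foldl (fun bounds d =>
        match bounds with
        | none => some (d, d)
        | some (lo, hi) => some (min lo d, max hi d)) (some (lo, hi)) =
      some (ds.foldl min lo, ds.foldl max hi) := by
  induction ds generalizing lo hi with
  | nil => simp
  | cons d t ih => simp [ih]

-- ===== VERDICT (by name: the statement is the Claim_ definition above) =====
theorem calculate_date_range_py_spec : Claim_equal_calculate_date_range_py := by
  intro messages _
  show calculate_date_range_py messages = calculate_date_range_py_alt messages
  unfold calculate_date_range_py calculate_date_range_py_alt
  rw [pvDates_eq messages [], pvBFold_eq messages none]
  simp only [List.nil_append]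
  by_cases hm : messages = []
  · subst hm; simp
  · simp only [hm, if_false]
    cases hds : messages.filterMap pvDateOf with
    | nil => simp
    | cons d t =>
      simp only [List.foldl_cons]
      rw [pvFold_minmax t d d, PySem.List.min?_id_cons, PySem.List.max?_id_cons]
      simp
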